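-- pv_equiv track=rewrite | github.com/Andreal2000/advent-of-code | 2016/13/a_maze_of_twisty_little_cubicles.py | part_two
-- ===== SOURCE A (Python) =====
-- def is_wall(x, y, input):
--     return bin(x*x + 3*x + 2*x*y + y + y*y + input).count("1") % 2 != 0
--
-- def part_two(input):
--     input = int(input)
--     queue = [(1, 1)]
--     seen = set()
--     steps = -1
--
--     while steps < 50:
--         steps += 1
--         for _ in range(len(queue)):
--             x, y = queue.pop(0)
--             seen.add((x, y))
--
--             for i in ((0, 1), (1, 0), (0, -1), (-1, 0)):
--                 next = tuple(map(sum, zip((x, y), i)))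
--                 if (next not in seen
--                         and min(*next) >= 0
--                         and not is_wall(*next, input)):
--                     queue.append(next)
--
--     return len(seen)
-- ===== SOURCE B (Python) =====
-- def is_wall(x, y, input):
--     return bin(x*x + 3*x + 2*x*y + y + y*y + input).count("1") % 2 != 0
--
-- N = 52    # every cell within 50 steps of (1, 1) has 0 <= x, y <= 51
-- INF = 100
--
-- def bump(row):
--     return [d + 1 for d in row]
--
-- def shift_left(row):
--     return row[1:] + [INF]
--
-- def shift_right(row):
--     return [INF] + row[:-1]
--
-- def merge(a, b):
--     return [x if x < y else y for x, y in zip(a, b)]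
--
-- def relax_row(wall_row, above, cur, below):
--     best = merge(merge(bump(above), bump(below)),
--                  merge(bump(shift_left(cur)), bump(shift_right(cur))))
--     return [d if w else (d if d < c else c)
--             for (w, d), c in zip(zip(wall_row, cur), best)]
--
-- def part_two(input):
--     input = int(input)
--     # distance-transform relaxation: 50 synchronous rounds of elementwise
--     # min with the four shifted neighbour grids (Bellman-Ford on the grid)
--     pad = [INF] * N
--     walls = [[is_wall(x, y, input) for y in range(N)] for x in range(N)]
--     dist = [[0 if (x, y) == (1, 1) else INF for y in range(N)] for x in range(N)]
--     for _ in range(50):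
--         dist = [relax_row(walls[x],
--                           dist[x - 1] if x > 0 else pad,
--                           dist[x],
--                           dist[x + 1] if x + 1 < N else pad)
--                 for x in range(N)]
--     return sum(d <= 50 for row in dist for d in row)
-- ===== Notes on version B (the rewrite author's own statement) =====
-- stated objective: alternative
-- what changed: Replaces A's queue-based wave BFS (pop(0) queue, seen-set, per-wave loop) by a grid distance transform: 50 synchronous Bellman-Ford relaxation rounds computing each cell's distance as an elementwise min of the four shifted copies of a 52x52 distance grid, then counting entries <= 50 - no queue, no visited set, no per-cell neighbour enumeration.
import Mathlib
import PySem

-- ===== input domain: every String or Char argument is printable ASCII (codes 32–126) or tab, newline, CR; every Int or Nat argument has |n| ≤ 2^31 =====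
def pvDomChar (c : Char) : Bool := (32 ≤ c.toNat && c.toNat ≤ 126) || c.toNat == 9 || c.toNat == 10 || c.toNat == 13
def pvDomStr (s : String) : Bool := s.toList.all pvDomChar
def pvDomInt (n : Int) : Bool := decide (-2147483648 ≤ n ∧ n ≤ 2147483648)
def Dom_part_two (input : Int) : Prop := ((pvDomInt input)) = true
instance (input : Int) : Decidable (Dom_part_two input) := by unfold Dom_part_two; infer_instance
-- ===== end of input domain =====

-- B replaces A's queue BFS by a distance-transform relaxation: 50 synchronous
-- rounds of elementwise min with the four shifted copies of a 52x52 distance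
-- grid (Bellman-Ford on the grid), then a count of entries ≤ 50; an
-- alternative algorithm, not claimed faster.
-- ===== PORT A =====
-- is_wall(x, y, input): bin(...).count("1") is the bit count of the absolute value (PySem.Int.bitCount); helper shared by both Pythons
def part_two_isWall (x y input : Int) : Bool :=
  decide (PySem.Int.bitCount (x*x + 3*x + 2*x*y + y + y*y + input) % 2 ≠ 0)

-- the literal tuple ((0,1),(1,0),(0,-1),(-1,0)) A iterates over
def part_two_deltas : List (Int × Int) := [(0,1),(1,0),(0,-1),(-1,0)]

-- the 'for _ in range(len(queue))' inner wave: fuel = the queue length taken at wave start;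
-- each step pops the front (the [] branch is unreachable: fuel never exceeds the queue length), adds it to seen, appends the admitted neighbours
def part_two_inner (input : Int) : Nat → List (Int × Int) → PySem.Set (Int × Int) → List (Int × Int) × PySem.Set (Int × Int)
  | 0, queue, seen => (queue, seen)
  | n+1, queue, seen =>
    match queue with
    | [] => ([], seen)
    | c :: rest =>
      let seen' := PySem.Set.add seen c
      let queue' := part_two_deltas.foldl (fun q i =>
        let next := (c.1 + i.1, c.2 + i.2)
        if !PySem.Set.contains seen' next && decide (min next.1 next.2 ≥ 0) && !part_two_isWall next.1 next.2 input
        then q ++ [next] else q) rest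
      part_two_inner input n queue' seen'

-- 'while steps < 50: steps += 1; <wave>'
def part_two_loop (input : Int) (steps : Int) (queue : List (Int × Int)) (seen : PySem.Set (Int × Int)) : List (Int × Int) × PySem.Set (Int × Int) :=
  if steps < 50 then
    let st := part_two_inner input queue.length queue seen
    part_two_loop input (steps + 1) st.1 st.2
  else (queue, seen)
termination_by (50 - steps).toNat
decreasing_by omega

def part_two (input : Int) : Int :=
  PySem.Set.len (part_two_loop input (-1) [(1, 1)] (PySem.Set.empty : PySem.Set (Int × Int))).2

-- ===== PORT B =====
-- bump(row) = [d + 1 for d in row]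
def part_two_bump (row : List Int) : List Int := row.map (fun d => d + 1)
-- shift_left(row) = row[1:] + [INF]
def part_two_shiftL (row : List Int) : List Int := PySem.List.slice row (some 1) none ++ [100]
-- shift_right(row) = [INF] + row[:-1]
def part_two_shiftR (row : List Int) : List Int := 100 :: PySem.List.slice row none (some (-1))
-- merge(a, b) = [x if x < y else y for x, y in zip(a, b)]
def part_two_merge (a b : List Int) : List Int := (a.zip b).map (fun p => if p.1 < p.2 then p.1 else p.2)
-- relax_row(wall_row, above, cur, below)
def part_two_relaxRow (wallRow : List Bool) (above cur below : List Int) : List Int :=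
  let best := part_two_merge (part_two_merge (part_two_bump above) (part_two_bump below))
                             (part_two_merge (part_two_bump (part_two_shiftL cur)) (part_two_bump (part_two_shiftR cur)))
  ((wallRow.zip cur).zip best).map (fun p => if p.1.1 then p.1.2 else if p.1.2 < p.2 then p.1.2 else p.2)

def part_two_alt (input : Int) : Int :=
  let pad : List Int := List.replicate 52 100
  let walls := (PySem.List.pyRange 0 52 1).map (fun x => (PySem.List.pyRange 0 52 1).map (fun y => part_two_isWall x y input))
  let dist0 := (PySem.List.pyRange 0 52 1).map (fun x => (PySem.List.pyRange 0 52 1).map (fun y => if x = 1 ∧ y = 1 then (0:Int) else 100))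
  let dist := (List.range 50).foldl (fun dist _ =>
    (PySem.List.pyRange 0 52 1).map (fun x =>
      part_two_relaxRow (PySem.List.pyGetD walls x [])
        (if 0 < x then PySem.List.pyGetD dist (x-1) [] else pad)
        (PySem.List.pyGetD dist x [])
        (if x + 1 < 52 then PySem.List.pyGetD dist (x+1) [] else pad))) dist0
  dist.foldl (fun acc row => row.foldl (fun acc d => if d ≤ 50 then acc + 1 else acc) acc) 0

-- ===== PRECONDITION & SPEC =====
def Spec_part_two (input : Int) (out : Int) : Prop := out = part_two_alt input
instance (input : Int) (out : Int) : Decidable (Spec_part_two input out) := by unfold Spec_part_two; infer_instance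

-- ===== CLAIM (what is proved, stated in full; the proofs are below) =====
def Claim_equal_part_two : Prop := ∀ (input : Int), Dom_part_two input → Spec_part_two input (part_two input)

-- ===== LEMMAS AND PROOFS =====

-- ---- proof-side vocabulary shared with the previous A-side development ----
def pvNbrs (c : Int × Int) : List (Int × Int) := part_two_deltas.map (fun i => (c.1 + i.1, c.2 + i.2))
def pvOk (input : Int) (w : Int × Int) : Bool := decide (min w.1 w.2 ≥ 0) && !part_two_isWall w.1 w.2 input
def pvCond (input : Int) (s : PySem.Set (Int × Int)) (w : Int × Int) : Bool := !PySem.Set.contains s w && pvOk input w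
def pvPar (c : Int × Int) : Bool := decide ((c.1 + c.2) % 2 = 0)
def pvStep1 (input : Int) (st : List (Int × Int) × PySem.Set (Int × Int)) (n : Int × Int) : List (Int × Int) × PySem.Set (Int × Int) :=
  if pvCond input st.2 n then (st.1 ++ [n], PySem.Set.add st.2 n) else st
def pvIterA (input : Int) : Nat → List (Int × Int) → PySem.Set (Int × Int) → List (Int × Int) × PySem.Set (Int × Int)
  | 0, q, s => (q, s)
  | n+1, q, s =>
    let st := part_two_inner input q.length q s
    pvIterA input n st.1 st.2

-- proof-side level BFS (mark at discovery): the reference point between A's wave BFS and B's relaxation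
def pvLevelStep (input : Int) (frontier : List (Int × Int)) (seen : PySem.Set (Int × Int)) : List (Int × Int) × PySem.Set (Int × Int) :=
  frontier.foldl (fun st c =>
    part_two_deltas.foldl (fun st i =>
      let n := (c.1 + i.1, c.2 + i.2)
      if !PySem.Set.contains st.2 n && decide (min n.1 n.2 ≥ 0) && !part_two_isWall n.1 n.2 input
      then (st.1 ++ [n], PySem.Set.add st.2 n) else st) st) ([], seen)

def pvLevelLoop (input : Int) : Nat → List (Int × Int) → PySem.Set (Int × Int) → List (Int × Int) × PySem.Set (Int × Int)
  | 0, frontier, seen => (frontier, seen)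
  | n+1, frontier, seen =>
    let st := pvLevelStep input frontier seen
    pvLevelLoop input n st.1 st.2

theorem pvContains_false (s : PySem.Set (Int × Int)) (w : Int × Int) :
    PySem.Set.contains s w = false ↔ w ∉ s := by
  rw [← Bool.not_eq_true, PySem.Set.contains_iff]

theorem pvContains_add_ne (s : PySem.Set (Int × Int)) (a w : Int × Int) (h : w ≠ a) :
    PySem.Set.contains (PySem.Set.add s a) w = PySem.Set.contains s w := by
  rw [Bool.eq_iff_iff]
  simp [PySem.Set.mem_add, h]

theorem pvPar_nbrs (c w : Int × Int) (h : w ∈ pvNbrs c) : pvPar w = !pvPar c := by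
  obtain ⟨x, y⟩ := c
  simp [pvNbrs, part_two_deltas] at h
  rcases h with h | h | h | h <;> subst h <;>
    · simp only [pvPar]
      rcases Int.emod_two_eq_zero_or_one (x + y) with h2 | h2 <;> simp [h2] <;> omega

theorem pvCond_add (input : Int) (s : PySem.Set (Int × Int)) (a c w : Int × Int)
    (hw : w ∈ pvNbrs c) (hpar : pvPar a = pvPar c) :
    pvCond input (PySem.Set.add s a) w = pvCond input s w := by
  have hne : w ≠ a := by
    intro e
    have hh := pvPar_nbrs c w hw
    rw [e, hpar] at hh
    simp at hh
  unfold pvCond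
  rw [pvContains_add_ne s a w hne]

theorem pvFold4_A (input : Int) (s : PySem.Set (Int × Int)) (c : Int × Int) (rest : List (Int × Int)) :
    part_two_deltas.foldl (fun q i =>
      let next := (c.1 + i.1, c.2 + i.2)
      if !PySem.Set.contains s next && decide (min next.1 next.2 ≥ 0) && !part_two_isWall next.1 next.2 input
      then q ++ [next] else q) rest
    = rest ++ (pvNbrs c).filter (pvCond input s) := by
  simp only [part_two_deltas, pvNbrs, List.foldl, List.map, List.filter_cons, List.filter_nil,
    pvCond, pvOk, Bool.and_assoc]
  split_ifs <;> simp_all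

theorem pvInnerA_spec (input : Int) : ∀ (q extra : List (Int × Int)) (s : PySem.Set (Int × Int)) (p : Bool),
    (∀ c ∈ q, pvPar c = p) →
    part_two_inner input q.length (q ++ extra) s
      = (extra ++ q.flatMap (fun c => (pvNbrs c).filter (pvCond input s)), q.foldl PySem.Set.add s) := by
  intro q
  induction q with
  | nil => intro extra s p _; simp [part_two_inner]
  | cons c q ih =>
    intro extra s p hp
    have hstep : part_two_inner input (c :: q).length ((c :: q) ++ extra) s
        = part_two_inner input q.length ((q ++ extra) ++ (pvNbrs c).filter (pvCond input (PySem.Set.add s c))) (PySem.Set.add s c) := by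
      simp only [List.length_cons, List.cons_append, part_two_inner]
      rw [pvFold4_A]
    rw [hstep]
    have hfc : (pvNbrs c).filter (pvCond input (PySem.Set.add s c)) = (pvNbrs c).filter (pvCond input s) :=
      List.filter_congr (fun w hw => pvCond_add input s c c w hw rfl)
    rw [hfc, List.append_assoc]
    rw [ih (extra ++ (pvNbrs c).filter (pvCond input s)) (PySem.Set.add s c) p
      (fun c' hc' => hp c' (List.mem_cons_of_mem _ hc'))]
    have hbm : q.flatMap (fun c' => (pvNbrs c').filter (pvCond input (PySem.Set.add s c)))
        = q.flatMap (fun c' => (pvNbrs c').filter (pvCond input s)) := by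
      simp only [List.flatMap]
      congr 1
      apply List.map_congr_left
      intro c' hc'
      exact List.filter_congr (fun w hw => pvCond_add input s c c' w hw
        (by rw [hp c (List.mem_cons_self), hp c' (List.mem_cons_of_mem _ hc')]))
    rw [hbm]
    simp [List.flatMap_cons, List.foldl]

theorem pvMem_foldl_add (q : List (Int × Int)) (s : PySem.Set (Int × Int)) (w : Int × Int) :
    w ∈ q.foldl PySem.Set.add s ↔ w ∈ s ∨ w ∈ q := by
  induction q generalizing s with
  | nil => simp
  | cons c q ih => simp [List.foldl, ih, PySem.Set.mem_add]; tauto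

theorem pvNodup_foldl_add (q : List (Int × Int)) (s : PySem.Set (Int × Int)) (h : s.Nodup) :
    (q.foldl PySem.Set.add s).Nodup := by
  induction q generalizing s with
  | nil => exact h
  | cons c q ih => exact ih _ (PySem.Set.nodup_add _ _ h)

theorem pvChain (input : Int) : ∀ (L nxt : List (Int × Int)) (s : PySem.Set (Int × Int)),
    (∀ w ∈ nxt, w ∈ s) →
    (∀ w, w ∈ (L.foldl (pvStep1 input) (nxt, s)).2 ↔ w ∈ s ∨ (w ∈ L ∧ pvOk input w = true)) ∧
    (∀ w, w ∈ (L.foldl (pvStep1 input) (nxt, s)).1 ↔ w ∈ nxt ∨ (w ∉ s ∧ w ∈ L ∧ pvOk input w = true)) ∧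
    (s.Nodup → (L.foldl (pvStep1 input) (nxt, s)).2.Nodup) := by
  intro L
  induction L with
  | nil =>
    intro nxt s hsub
    refine ⟨by simp, by simp, fun h => h⟩
  | cons a L ih =>
    intro nxt s hsub
    simp only [List.foldl_cons]
    by_cases h : pvCond input s a = true
    · have ha : a ∉ s ∧ pvOk input a = true := by
        simpa only [pvCond, Bool.and_eq_true, Bool.not_eq_true', pvContains_false] using h
      have hst : pvStep1 input (nxt, s) a = (nxt ++ [a], PySem.Set.add s a) := by
        simp [pvStep1, h]
      rw [hst]
      have hsub' : ∀ w ∈ nxt ++ [a], w ∈ PySem.Set.add s a := by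
        intro w hw
        rcases List.mem_append.mp hw with hw | hw
        · exact (PySem.Set.mem_add _ _ _).mpr (Or.inl (hsub w hw))
        · simp at hw; subst hw; exact (PySem.Set.mem_add _ _ _).mpr (Or.inr rfl)
      obtain ⟨c1, c2, c3⟩ := ih (nxt ++ [a]) (PySem.Set.add s a) hsub'
      refine ⟨?_, ?_, ?_⟩
      · intro w
        rw [c1 w]
        simp only [PySem.Set.mem_add, List.mem_cons]
        by_cases hw : w = a <;> simp [hw, ha.1, ha.2] <;> tauto
      · intro w
        rw [c2 w]
        simp only [List.mem_append, PySem.Set.mem_add, List.mem_cons, not_or]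
        by_cases hw : w = a <;> simp [hw, ha.1, ha.2] <;> tauto
      · intro hnd
        exact c3 (PySem.Set.nodup_add _ _ hnd)
    · have ha : a ∈ s ∨ pvOk input a = false := by
        by_cases hm : a ∈ s
        · exact Or.inl hm
        · right
          cases hok : pvOk input a
          · rfl
          · exfalso
            apply h
            simp only [pvCond, Bool.and_eq_true, Bool.not_eq_true', pvContains_false]
            exact ⟨hm, hok⟩
      have hst : pvStep1 input (nxt, s) a = (nxt, s) := by
        simp [pvStep1, h]
      rw [hst]
      obtain ⟨c1, c2, c3⟩ := ih nxt s hsub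
      refine ⟨?_, ?_, c3⟩
      · intro w
        rw [c1 w]
        simp only [List.mem_cons]
        rcases ha with ha | ha <;>
          (by_cases hw : w = a <;> simp [hw, ha] <;> tauto)
      · intro w
        rw [c2 w]
        simp only [List.mem_cons]
        rcases ha with ha | ha <;>
          (by_cases hw : w = a <;> simp [hw, ha] <;> tauto)

theorem pvStepB_eq (input : Int) (f : List (Int × Int)) (s : PySem.Set (Int × Int)) :
    pvLevelStep input f s = (f.flatMap pvNbrs).foldl (pvStep1 input) ([], s) := by
  suffices h : ∀ (f : List (Int × Int)) (st : List (Int × Int) × PySem.Set (Int × Int)),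
      f.foldl (fun st c =>
        part_two_deltas.foldl (fun st i =>
          let n := (c.1 + i.1, c.2 + i.2)
          if !PySem.Set.contains st.2 n && decide (min n.1 n.2 ≥ 0) && !part_two_isWall n.1 n.2 input
          then (st.1 ++ [n], PySem.Set.add st.2 n) else st) st) st
      = (f.flatMap pvNbrs).foldl (pvStep1 input) st by
    exact h f ([], s)
  intro f
  induction f with
  | nil => intro st; simp
  | cons c f ih =>
    intro st
    simp only [List.foldl_cons, List.flatMap_cons, List.foldl_append]
    rw [← ih]
    congr 1
    have hfun : (fun (st : List (Int × Int) × PySem.Set (Int × Int)) (i : Int × Int) =>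
        let n := (c.1 + i.1, c.2 + i.2)
        if !PySem.Set.contains st.2 n && decide (min n.1 n.2 ≥ 0) && !part_two_isWall n.1 n.2 input
        then (st.1 ++ [n], PySem.Set.add st.2 n) else st)
        = (fun st i => pvStep1 input st (c.1 + i.1, c.2 + i.2)) := by
      funext st i
      simp only [pvStep1, pvCond, pvOk, Bool.and_assoc]
      rfl
    rw [hfun]
    simp only [pvNbrs, List.foldl_map]

theorem pvLoopA_eq_iterA (input : Int) : ∀ (n : Nat) (steps : Int) (q : List (Int × Int)) (s : PySem.Set (Int × Int)),
    steps = 50 - (n : Int) →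
    part_two_loop input steps q s = pvIterA input n q s := by
  intro n
  induction n with
  | zero =>
    intro steps q s h
    rw [part_two_loop]
    simp [h, pvIterA]
  | succ n ih =>
    intro steps q s h
    rw [part_two_loop]
    have hlt : steps < 50 := by omega
    simp only [hlt, if_pos]
    rw [pvIterA]
    exact ih _ _ _ (by push_cast at h ⊢; omega)

theorem pvMain (input : Int) : ∀ (n : Nat) (q f : List (Int × Int)) (sA sB : PySem.Set (Int × Int)) (p : Bool),
    (∀ c ∈ q, pvPar c = p) →
    (∀ w, w ∈ f ↔ w ∈ q) →
    (∀ w, w ∈ sB ↔ w ∈ sA ∨ w ∈ q) →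
    sA.Nodup → sB.Nodup →
    (∀ w, w ∈ (pvIterA input (n+1) q sA).2 ↔ w ∈ (pvLevelLoop input n f sB).2) ∧
    (pvIterA input (n+1) q sA).2.Nodup ∧ (pvLevelLoop input n f sB).2.Nodup := by
  intro n
  induction n with
  | zero =>
    intro q f sA sB p hp hf hs hndA hndB
    have h1 : pvIterA input 1 q sA = (q.flatMap (fun c => (pvNbrs c).filter (pvCond input sA)), q.foldl PySem.Set.add sA) := by
      rw [pvIterA]
      simpa using pvInnerA_spec input q [] sA p hp
    have h2 : pvLevelLoop input 0 f sB = (f, sB) := rfl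
    rw [h1, h2]
    refine ⟨?_, pvNodup_foldl_add q sA hndA, hndB⟩
    intro w
    show w ∈ q.foldl PySem.Set.add sA ↔ w ∈ sB
    rw [pvMem_foldl_add, hs w]
  | succ n ih =>
    intro q f sA sB p hp hf hs hndA hndB
    have hw : part_two_inner input q.length q sA
        = (q.flatMap (fun c => (pvNbrs c).filter (pvCond input sA)), q.foldl PySem.Set.add sA) := by
      simpa using pvInnerA_spec input q [] sA p hp
    have hA : pvIterA input (n+1+1) q sA
        = pvIterA input (n+1) (q.flatMap (fun c => (pvNbrs c).filter (pvCond input sA))) (q.foldl PySem.Set.add sA) := by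
      rw [pvIterA, hw]
    have hB : pvLevelLoop input (n+1) f sB
        = pvLevelLoop input n ((f.flatMap pvNbrs).foldl (pvStep1 input) ([], sB)).1
            ((f.flatMap pvNbrs).foldl (pvStep1 input) ([], sB)).2 := by
      rw [pvLevelLoop, pvStepB_eq]
    obtain ⟨b1, b2, b3⟩ := pvChain input (f.flatMap pvNbrs) [] sB (by simp)
    have hparw : ∀ w : Int × Int, (∃ c ∈ q, w ∈ pvNbrs c) → pvPar w = !p := by
      rintro w ⟨c, hc, hw'⟩
      rw [pvPar_nbrs c w hw', hp c hc]
    have hnotq : ∀ w : Int × Int, (∃ c ∈ q, w ∈ pvNbrs c) → w ∉ q := by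
      intro w hw' hq
      have h1 := hparw w hw'
      have h2 := hp w hq
      rw [h2] at h1
      simp at h1
    have hLf : ∀ w : Int × Int, w ∈ f.flatMap pvNbrs ↔ ∃ c ∈ q, w ∈ pvNbrs c := by
      intro w
      simp only [List.mem_flatMap]
      constructor
      · rintro ⟨c, hc, hw'⟩; exact ⟨c, (hf c).mp hc, hw'⟩
      · rintro ⟨c, hc, hw'⟩; exact ⟨c, (hf c).mpr hc, hw'⟩
    have hq' : ∀ w : Int × Int, w ∈ q.flatMap (fun c => (pvNbrs c).filter (pvCond input sA))
        ↔ (∃ c ∈ q, w ∈ pvNbrs c) ∧ (w ∉ sA ∧ pvOk input w = true) := by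
      intro w
      constructor
      · intro hw'
        rcases List.mem_flatMap.mp hw' with ⟨c, hc, hwf⟩
        rcases List.mem_filter.mp hwf with ⟨hwn, hcd⟩
        simp only [pvCond, Bool.and_eq_true, Bool.not_eq_true', pvContains_false] at hcd
        exact ⟨⟨c, hc, hwn⟩, hcd⟩
      · rintro ⟨⟨c, hc, hw'⟩, hm, hok⟩
        refine List.mem_flatMap.mpr ⟨c, hc, List.mem_filter.mpr ⟨hw', ?_⟩⟩
        simp only [pvCond, Bool.and_eq_true, Bool.not_eq_true', pvContains_false]
        exact ⟨hm, hok⟩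
    have hb2 : ∀ w, w ∈ ((f.flatMap pvNbrs).foldl (pvStep1 input) ([], sB)).1
        ↔ (w ∉ sB ∧ w ∈ f.flatMap pvNbrs ∧ pvOk input w = true) := by
      intro w
      rw [b2 w]
      simp
    rw [hA, hB]
    apply ih _ _ _ _ (!p)
    · intro c hc
      exact hparw c ((hq' c).mp hc).1
    · intro w
      rw [hb2 w, hq' w, hLf w]
      constructor
      · rintro ⟨hnB, hc, hok⟩
        exact ⟨hc, fun hm => hnB ((hs w).mpr (Or.inl hm)), hok⟩
      · rintro ⟨hc, hm, hok⟩
        refine ⟨?_, hc, hok⟩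
        intro hwB
        rcases (hs w).mp hwB with h | h
        · exact hm h
        · exact hnotq w hc h
    · intro w
      rw [b1 w, pvMem_foldl_add, hq' w, hLf w, hs w]
      constructor
      · rintro ((h | h) | ⟨hc, hok⟩)
        · exact Or.inl (Or.inl h)
        · exact Or.inl (Or.inr h)
        · by_cases hm : w ∈ sA
          · exact Or.inl (Or.inl hm)
          · exact Or.inr ⟨hc, hm, hok⟩
      · rintro ((h | h) | ⟨hc, hm, hok⟩)
        · exact Or.inl (Or.inl h)
        · exact Or.inl (Or.inr h)
        · exact Or.inr ⟨hc, hok⟩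
    · exact pvNodup_foldl_add q sA hndA
    · exact b3 hndB

-- ---- the BFS ball: pvBall input k w ⟺ w is discovered within k BFS waves ----
def pvBall (input : Int) : Nat → (Int × Int) → Prop
  | 0, w => w = (1, 1)
  | k+1, w => pvBall input k w ∨ (pvOk input w = true ∧ ∃ i ∈ part_two_deltas, pvBall input k (w.1 - i.1, w.2 - i.2))

def pvSphere (input : Int) : Nat → (Int × Int) → Prop
  | 0, w => w = (1, 1)
  | k+1, w => pvBall input (k+1) w ∧ ¬ pvBall input k w

theorem pvMem_nbrs (c w : Int × Int) : w ∈ pvNbrs c ↔ ∃ i ∈ part_two_deltas, w = (c.1 + i.1, c.2 + i.2) := by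
  simp [pvNbrs, eq_comm]

theorem pvBall_succ_iff (input : Int) (k : Nat) (w : Int × Int) :
    pvBall input (k+1) w ↔ pvBall input k w ∨ (pvOk input w = true ∧ ∃ c, pvBall input k c ∧ w ∈ pvNbrs c) := by
  constructor
  · intro h
    rcases h with h | ⟨hok, i, hi, hb⟩
    · exact Or.inl h
    · refine Or.inr ⟨hok, (w.1 - i.1, w.2 - i.2), hb, ?_⟩
      rw [pvMem_nbrs]
      exact ⟨i, hi, by simp⟩
  · intro h
    rcases h with h | ⟨hok, c, hb, hnb⟩
    · exact Or.inl h
    · rcases (pvMem_nbrs c w).mp hnb with ⟨i, hi, hw⟩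
      refine Or.inr ⟨hok, i, hi, ?_⟩
      have : (w.1 - i.1, w.2 - i.2) = c := by rw [hw]; simp
      rw [this]; exact hb

theorem pvBall_mono (input : Int) {j k : Nat} (h : j ≤ k) {w : Int × Int} (hw : pvBall input j w) : pvBall input k w := by
  induction k with
  | zero => have : j = 0 := by omega
            subst this; exact hw
  | succ k ih =>
    rcases Nat.lt_or_ge j (k+1) with hj | hj
    · exact Or.inl (ih (by omega))
    · have : j = k + 1 := by omega
      subst this; exact hw

theorem pvSphere_sub_ball (input : Int) (k : Nat) (w : Int × Int) (h : pvSphere input k w) : pvBall input k w := by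
  cases k with
  | zero => exact h
  | succ k => exact h.1

theorem pvSphere_adj (input : Int) (k : Nat) (w : Int × Int)
    (hok : pvOk input w = true) (hnb : ¬ pvBall input k w)
    (h : ∃ c, pvBall input k c ∧ w ∈ pvNbrs c) : ∃ c, pvSphere input k c ∧ w ∈ pvNbrs c := by
  rcases h with ⟨c, hc, hadj⟩
  cases k with
  | zero => exact ⟨c, hc, hadj⟩
  | succ k =>
    by_cases hck : pvBall input k c
    · exfalso
      apply hnb
      rw [pvBall_succ_iff]
      exact Or.inr ⟨hok, c, hck, hadj⟩
    · exact ⟨c, ⟨hc, hck⟩, hadj⟩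

theorem pvLevel_inv (input : Int) : ∀ (n r : Nat) (f : List (Int × Int)) (s : PySem.Set (Int × Int)),
    (∀ w, w ∈ s ↔ pvBall input r w) →
    (∀ w, w ∈ f ↔ pvSphere input r w) →
    ∀ w, w ∈ (pvLevelLoop input n f s).2 ↔ pvBall input (r + n) w := by
  intro n
  induction n with
  | zero => intro r f s hs hf w; simpa [pvLevelLoop] using hs w
  | succ n ih =>
    intro r f s hs hf w
    rw [pvLevelLoop, pvStepB_eq]
    obtain ⟨b1, b2, _⟩ := pvChain input (f.flatMap pvNbrs) [] s (by simp)
    have hL : ∀ v : Int × Int, v ∈ f.flatMap pvNbrs ↔ ∃ c, pvSphere input r c ∧ v ∈ pvNbrs c := by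
      intro v
      simp only [List.mem_flatMap]
      constructor
      · rintro ⟨c, hc, hv⟩; exact ⟨c, (hf c).mp hc, hv⟩
      · rintro ⟨c, hc, hv⟩; exact ⟨c, (hf c).mpr hc, hv⟩
    have hseen : ∀ v : Int × Int, v ∈ ((f.flatMap pvNbrs).foldl (pvStep1 input) ([], s)).2 ↔ pvBall input (r+1) v := by
      intro v
      rw [b1 v, hs v, pvBall_succ_iff]
      constructor
      · rintro (h | ⟨hv, hok⟩)
        · exact Or.inl h
        · rcases (hL v).mp hv with ⟨c, hc, hadj⟩
          exact Or.inr ⟨hok, c, pvSphere_sub_ball input r c hc, hadj⟩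
      · rintro (h | ⟨hok, c, hc, hadj⟩)
        · exact Or.inl h
        · by_cases hvb : pvBall input r v
          · exact Or.inl hvb
          · rcases pvSphere_adj input r v hok hvb ⟨c, hc, hadj⟩ with ⟨c', hc', hadj'⟩
            exact Or.inr ⟨(hL v).mpr ⟨c', hc', hadj'⟩, hok⟩
    have hfront : ∀ v : Int × Int, v ∈ ((f.flatMap pvNbrs).foldl (pvStep1 input) ([], s)).1 ↔ pvSphere input (r+1) v := by
      intro v
      rw [b2 v]
      simp only [List.not_mem_nil, false_or]
      show (v ∉ s ∧ v ∈ f.flatMap pvNbrs ∧ pvOk input v = true) ↔ pvBall input (r+1) v ∧ ¬ pvBall input r v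
      constructor
      · rintro ⟨hns, hv, hok⟩
        have hnb : ¬ pvBall input r v := fun hb => hns ((hs v).mpr hb)
        rcases (hL v).mp hv with ⟨c, hc, hadj⟩
        refine ⟨?_, hnb⟩
        rw [pvBall_succ_iff]
        exact Or.inr ⟨hok, c, pvSphere_sub_ball input r c hc, hadj⟩
      · rintro ⟨hb1, hnb⟩
        rcases (pvBall_succ_iff input r v).mp hb1 with h | ⟨hok, c, hc, hadj⟩
        · exact absurd h hnb
        · rcases pvSphere_adj input r v hok hnb ⟨c, hc, hadj⟩ with ⟨c', hc', hadj'⟩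
          exact ⟨fun hvs => hnb ((hs v).mp hvs), (hL v).mpr ⟨c', hc', hadj'⟩, hok⟩
    rw [show r + (n+1) = r + 1 + n by omega]
    exact ih (r+1) _ _ hseen hfront w

-- ---- the functional model of B's grid relaxation ----
def pvR : List Int := PySem.List.pyRange 0 52 1
def pvRow (f : Int → Int) : List Int := pvR.map f
def pvGrid (g : Int → Int → Int) : List (List Int) := pvR.map (fun x => pvRow (g x))

def pvCand (g : Int → Int → Int) (x y : Int) : Int :=
  if 0 ≤ x ∧ x < 52 ∧ 0 ≤ y ∧ y < 52 then g x y + 1 else 101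

def pvStepF (input : Int) (g : Int → Int → Int) (x y : Int) : Int :=
  if part_two_isWall x y input then g x y
  else min (g x y) (min (min (pvCand g (x-1) y) (pvCand g (x+1) y)) (min (pvCand g x (y+1)) (pvCand g x (y-1))))

def pvJ (input : Int) : Nat → Int → Int → Int
  | 0 => fun x y => if x = 1 ∧ y = 1 then 0 else 100
  | k+1 => pvStepF input (pvJ input k)

theorem pvIf_lt_min (a b : Int) : (if a < b then a else b) = min a b := by
  split_ifs with h <;> omega

theorem pvMap_shift {α : Type} (a b : Int) (f : Int → α) :
    (PySem.List.pyRange (a+1) (b+1) 1).map f = (PySem.List.pyRange a b 1).map (fun y => f (y+1)) := by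
  rw [PySem.List.pyRange_one, PySem.List.pyRange_one, List.map_map, List.map_map]
  rw [show (b + 1 - (a + 1)) = b - a by ring]
  apply List.map_congr_left
  intro k _
  show f (a + 1 + k) = f (a + k + 1)
  congr 1
  ring

theorem pvR_cons : pvR = 0 :: PySem.List.pyRange 1 52 1 := by
  rw [pvR, PySem.List.pyRange_one_cons (by norm_num)]
  norm_num

theorem pvR_snoc : pvR = PySem.List.pyRange 0 51 1 ++ [51] := by
  rw [pvR, show (52:Int) = 51 + 1 by norm_num, PySem.List.pyRange_one_succ_right (by norm_num)]

theorem pvRow_bump (f : Int → Int) : part_two_bump (pvRow f) = pvRow (fun y => f y + 1) := by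
  simp [part_two_bump, pvRow, List.map_map]

theorem pvRow_pad : List.replicate 52 (100:Int) = pvRow (fun _ => 100) := by
  rw [pvRow, List.map_const', pvR, PySem.List.length_pyRange_one]
  rfl

theorem pvRow_shiftL (f : Int → Int) :
    part_two_shiftL (pvRow f) = pvRow (fun y => if y < 51 then f (y+1) else 100) := by
  rw [part_two_shiftL, PySem.List.slice_from_one]
  conv_lhs => rw [pvRow, pvR_cons]
  rw [List.map_cons, List.tail_cons]
  conv_rhs => rw [pvRow, pvR_snoc]
  rw [List.map_append, List.map_singleton]
  rw [show (PySem.List.pyRange 1 52 1) = PySem.List.pyRange (0+1) (51+1) 1 by norm_num]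
  rw [pvMap_shift]
  congr 1

theorem pvRow_shiftR (f : Int → Int) :
    part_two_shiftR (pvRow f) = pvRow (fun y => if 0 < y then f (y-1) else 100) := by
  rw [part_two_shiftR, PySem.List.slice_to_neg_one]
  conv_lhs => rw [pvRow, pvR_snoc, List.map_append, List.map_singleton, List.dropLast_concat]
  conv_rhs => rw [pvRow, pvR_cons]
  rw [List.map_cons,
    show (PySem.List.pyRange 1 52 1) = PySem.List.pyRange (0+1) (51+1) 1 by norm_num, pvMap_shift]
  congr 1

theorem pvRow_merge (f h : Int → Int) :
    part_two_merge (pvRow f) (pvRow h) = pvRow (fun y => min (f y) (h y)) := by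
  rw [part_two_merge, pvRow, pvRow, pvRow, List.zip_map', List.map_map]
  apply List.map_congr_left
  intro y _
  exact pvIf_lt_min (f y) (h y)

theorem pvRelaxRow_eq (input x : Int) (g : Int → Int → Int) (hx0 : 0 ≤ x) (hx1 : x < 52) :
    part_two_relaxRow (pvR.map (fun y => part_two_isWall x y input))
      (if 0 < x then pvRow (g (x-1)) else List.replicate 52 100)
      (pvRow (g x))
      (if x + 1 < 52 then pvRow (g (x+1)) else List.replicate 52 100)
    = pvRow (pvStepF input g x) := by
  obtain ⟨A, hA, hAc⟩ : ∃ A : Int → Int, (if 0 < x then pvRow (g (x-1)) else List.replicate 52 100) = pvRow A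
      ∧ ∀ y, 0 ≤ y → y < 52 → A y + 1 = pvCand g (x-1) y := by
    by_cases hx : 0 < x
    · refine ⟨g (x-1), by rw [if_pos hx], ?_⟩
      intro y h1 h2
      rw [pvCand, if_pos ⟨by omega, by omega, h1, h2⟩]
    · refine ⟨fun _ => 100, by rw [if_neg hx, pvRow_pad], ?_⟩
      intro y h1 h2
      rw [pvCand, if_neg (by rintro ⟨h3, _, _⟩; omega)]
      norm_num
  obtain ⟨B, hB, hBc⟩ : ∃ B : Int → Int, (if x + 1 < 52 then pvRow (g (x+1)) else List.replicate 52 100) = pvRow B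
      ∧ ∀ y, 0 ≤ y → y < 52 → B y + 1 = pvCand g (x+1) y := by
    by_cases hx : x + 1 < 52
    · refine ⟨g (x+1), by rw [if_pos hx], ?_⟩
      intro y h1 h2
      rw [pvCand, if_pos ⟨by omega, by omega, h1, h2⟩]
    · refine ⟨fun _ => 100, by rw [if_neg hx, pvRow_pad], ?_⟩
      intro y h1 h2
      rw [pvCand, if_neg (by rintro ⟨_, h3, _⟩; omega)]
      norm_num
  rw [hA, hB]
  simp only [part_two_relaxRow, pvRow_shiftL, pvRow_shiftR, pvRow_bump, pvRow_merge]
  simp only [pvRow]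
  rw [List.zip_map', List.zip_map', List.map_map]
  apply List.map_congr_left
  intro y hy
  have hy' := (PySem.List.mem_pyRange_one).mp (by rw [← pvR]; exact hy)
  simp only [Function.comp_apply]
  rw [pvIf_lt_min]
  rw [pvStepF, hAc y hy'.1 hy'.2, hBc y hy'.1 hy'.2]
  have hL : (if y < 51 then g x (y+1) else 100) + 1 = pvCand g x (y+1) := by
    by_cases h : y < 51
    · rw [if_pos h, pvCand, if_pos ⟨hx0, hx1, by omega, by omega⟩]
    · rw [if_neg h, pvCand, if_neg (by rintro ⟨_, _, _, h4⟩; omega)]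
      norm_num
  have hR : (if 0 < y then g x (y-1) else 100) + 1 = pvCand g x (y-1) := by
    by_cases h : 0 < y
    · rw [if_pos h, pvCand, if_pos ⟨hx0, hx1, by omega, by omega⟩]
    · rw [if_neg h, pvCand, if_neg (by rintro ⟨_, _, h3, _⟩; omega)]
      norm_num
  rw [hL, hR]

theorem pvStep_grid (input : Int) (g : Int → Int → Int) :
    (PySem.List.pyRange 0 52 1).map (fun x =>
      part_two_relaxRow (PySem.List.pyGetD ((PySem.List.pyRange 0 52 1).map (fun x => (PySem.List.pyRange 0 52 1).map (fun y => part_two_isWall x y input))) x [])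
        (if 0 < x then PySem.List.pyGetD (pvGrid g) (x-1) [] else List.replicate 52 100)
        (PySem.List.pyGetD (pvGrid g) x [])
        (if x + 1 < 52 then PySem.List.pyGetD (pvGrid g) (x+1) [] else List.replicate 52 100))
    = pvGrid (pvStepF input g) := by
  conv_rhs => rw [pvGrid]
  apply List.map_congr_left
  intro x hx
  have hx' := (PySem.List.mem_pyRange_one).mp hx
  have hw : PySem.List.pyGetD ((PySem.List.pyRange 0 52 1).map (fun x => (PySem.List.pyRange 0 52 1).map (fun y => part_two_isWall x y input))) x []
      = (PySem.List.pyRange 0 52 1).map (fun y => part_two_isWall x y input) :=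
    PySem.List.pyGetD_map_pyRange_of_nonneg _ 52 x [] hx'.1 hx'.2
  have hg : ∀ u : Int, 0 ≤ u → u < 52 → PySem.List.pyGetD (pvGrid g) u [] = pvRow (g u) := by
    intro u h1 h2
    exact PySem.List.pyGetD_map_pyRange_of_nonneg _ 52 u [] h1 h2
  have e1 : (if 0 < x then PySem.List.pyGetD (pvGrid g) (x-1) [] else List.replicate 52 100)
      = (if 0 < x then pvRow (g (x-1)) else List.replicate 52 100) := by
    by_cases h : 0 < x
    · rw [if_pos h, if_pos h, hg _ (by omega) (by omega)]
    · rw [if_neg h, if_neg h]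
  have e2 : (if x + 1 < 52 then PySem.List.pyGetD (pvGrid g) (x+1) [] else List.replicate 52 100)
      = (if x + 1 < 52 then pvRow (g (x+1)) else List.replicate 52 100) := by
    by_cases h : x + 1 < 52
    · rw [if_pos h, if_pos h, hg _ (by omega) (by omega)]
    · rw [if_neg h, if_neg h]
  rw [hw, e1, e2, hg x hx'.1 hx'.2]
  exact pvRelaxRow_eq input x g hx'.1 hx'.2

theorem pvAlt_dist (input : Int) : ∀ (n k : Nat),
    (List.range n).foldl (fun dist _ =>
      (PySem.List.pyRange 0 52 1).map (fun x =>
        part_two_relaxRow (PySem.List.pyGetD ((PySem.List.pyRange 0 52 1).map (fun x => (PySem.List.pyRange 0 52 1).map (fun y => part_two_isWall x y input))) x [])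
          (if 0 < x then PySem.List.pyGetD dist (x-1) [] else List.replicate 52 100)
          (PySem.List.pyGetD dist x [])
          (if x + 1 < 52 then PySem.List.pyGetD dist (x+1) [] else List.replicate 52 100))) (pvGrid (pvJ input k))
    = pvGrid (pvJ input (k + n)) := by
  intro n
  induction n with
  | zero => intro k; simp
  | succ n ih =>
    intro k
    rw [List.range_succ, List.foldl_append, ih k, List.foldl_cons, List.foldl_nil, pvStep_grid]
    rw [show k + (n+1) = (k + n) + 1 by omega]
    rfl

-- ---- pvJ vs pvBall ----
theorem pvJ_nonneg (input : Int) : ∀ (k : Nat) (x y : Int), 0 ≤ pvJ input k x y := by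
  intro k
  induction k with
  | zero =>
    intro x y
    simp only [pvJ]
    split_ifs <;> norm_num
  | succ k ih =>
    intro x y
    have hc : ∀ u v : Int, 0 ≤ pvCand (pvJ input k) u v := by
      intro u v
      rw [pvCand]
      split_ifs with h
      · have := ih u v; omega
      · norm_num
    show 0 ≤ pvStepF input (pvJ input k) x y
    rw [pvStepF]
    split_ifs with h
    · exact ih x y
    · exact le_min (ih x y) (le_min (le_min (hc _ _) (hc _ _)) (le_min (hc _ _) (hc _ _)))

theorem pvJ_step_le (input : Int) (g : Int → Int → Int) (x y : Int) : pvStepF input g x y ≤ g x y := by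
  rw [pvStepF]
  split_ifs with h
  · exact le_refl _
  · exact min_le_left _ _

theorem pvBall_bounds (input : Int) : ∀ (k : Nat) (w : Int × Int),
    pvBall input k w → 0 ≤ w.1 ∧ 0 ≤ w.2 ∧ w.1 ≤ (k : Int) + 1 ∧ w.2 ≤ (k : Int) + 1 := by
  intro k
  induction k with
  | zero =>
    intro w h
    have hw : w = (1, 1) := h
    subst hw
    norm_num
  | succ k ih =>
    intro w h
    rcases h with h | ⟨hok, i, hi, hb⟩
    · have := ih w h
      push_cast
      push_cast at this
      omega
    · have hv := ih _ hb
      have hmin : 0 ≤ w.1 ∧ 0 ≤ w.2 := by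
        simp only [pvOk, Bool.and_eq_true, decide_eq_true_eq, ge_iff_le, le_min_iff] at hok
        exact hok.1
      simp only [part_two_deltas, List.mem_cons, List.not_mem_nil, or_false] at hi
      push_cast
      push_cast at hv
      rcases hi with h' | h' | h' | h' <;> subst h' <;> simp only at hv <;>
        exact ⟨hmin.1, hmin.2, by omega, by omega⟩

theorem pvJ_le_of_ball (input : Int) : ∀ (k : Nat), k ≤ 50 → ∀ (w : Int × Int),
    pvBall input k w → pvJ input k w.1 w.2 ≤ (k : Int) := by
  intro k
  induction k with
  | zero =>
    intro _ w hb
    have hw : w = (1, 1) := hb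
    subst hw
    simp [pvJ]
  | succ k ih =>
    intro hk w hb
    show pvStepF input (pvJ input k) w.1 w.2 ≤ ((k:Int) + 1)
    rcases hb with hb | ⟨hok, i, hi, hb⟩
    · have h1 := pvJ_step_le input (pvJ input k) w.1 w.2
      have h2 := ih (by omega) w hb
      omega
    · have hbd := pvBall_bounds input k _ hb
      have hJv : pvJ input k (w.1 - i.1) (w.2 - i.2) ≤ (k:Int) := by
        simpa using ih (by omega) _ hb
      have hcand : pvCand (pvJ input k) (w.1 - i.1) (w.2 - i.2) ≤ (k:Int) + 1 := by
        rw [pvCand, if_pos ⟨hbd.1, by have := hbd.2.2.1; push_cast at this ⊢; omega,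
          hbd.2.1, by have := hbd.2.2.2; push_cast at this ⊢; omega⟩]
        omega
      have hnw : part_two_isWall w.1 w.2 input = false := by
        simp only [pvOk, Bool.and_eq_true, Bool.not_eq_true'] at hok
        exact hok.2
      rw [pvStepF, if_neg (by rw [hnw]; exact Bool.false_ne_true)]
      simp only [part_two_deltas, List.mem_cons, List.not_mem_nil, or_false] at hi
      rcases hi with h' | h' | h' | h' <;> subst h' <;> norm_num at hcand
      · exact le_trans (le_trans (min_le_right _ _) (le_trans (min_le_right _ _) (min_le_right _ _))) hcand
      · exact le_trans (le_trans (min_le_right _ _) (le_trans (min_le_left _ _) (min_le_left _ _))) hcand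
      · exact le_trans (le_trans (min_le_right _ _) (le_trans (min_le_right _ _) (min_le_left _ _))) hcand
      · exact le_trans (le_trans (min_le_right _ _) (le_trans (min_le_left _ _) (min_le_right _ _))) hcand

theorem pvBall_of_J_le (input : Int) : ∀ (k : Nat) (x y : Int) (m : Nat), m ≤ 50 →
    0 ≤ x → x < 52 → 0 ≤ y → y < 52 →
    pvJ input k x y ≤ (m : Int) → pvBall input m (x, y) := by
  intro k
  induction k with
  | zero =>
    intro x y m hm hx0 hx1 hy0 hy1 hJ
    simp only [pvJ] at hJ
    split_ifs at hJ with h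
    · obtain ⟨hx, hy⟩ := h
      subst hx; subst hy
      exact pvBall_mono input (Nat.zero_le m) rfl
    · omega
  | succ k ih =>
    intro x y m hm hx0 hx1 hy0 hy1 hJ
    replace hJ : pvStepF input (pvJ input k) x y ≤ (m:Int) := hJ
    rw [pvStepF] at hJ
    split_ifs at hJ with hwall
    · exact ih x y m hm hx0 hx1 hy0 hy1 hJ
    · rcases min_le_iff.mp hJ with hd | hc
      · exact ih x y m hm hx0 hx1 hy0 hy1 hd
      · have hcand : ∀ u v : Int, pvCand (pvJ input k) u v ≤ (m:Int) →
            (0 ≤ u ∧ u < 52 ∧ 0 ≤ v ∧ v < 52) ∧ ∃ m' : Nat, m = m' + 1 ∧ pvBall input m' (u, v) := by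
          intro u v huv
          rw [pvCand] at huv
          split_ifs at huv with hbox
          · have hnn := pvJ_nonneg input k u v
            obtain ⟨m', rfl⟩ : ∃ m', m = m' + 1 := ⟨m - 1, by omega⟩
            refine ⟨hbox, m', rfl, ?_⟩
            exact ih u v m' (by omega) hbox.1 hbox.2.1 hbox.2.2.1 hbox.2.2.2 (by push_cast at huv ⊢; omega)
          · omega
        have hok : pvOk input (x, y) = true := by
          simp only [pvOk, Bool.and_eq_true, decide_eq_true_eq, ge_iff_le, le_min_iff,
            Bool.not_eq_true']
          exact ⟨⟨hx0, hy0⟩, by simpa using hwall⟩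
        rcases min_le_iff.mp hc with h2 | h2 <;> rcases min_le_iff.mp h2 with h3 | h3
        · obtain ⟨_, m', rfl, hb⟩ := hcand _ _ h3
          refine Or.inr ⟨hok, (1, 0), by simp [part_two_deltas], by show pvBall input m' (x - 1, y - 0); simpa using hb⟩
        · obtain ⟨_, m', rfl, hb⟩ := hcand _ _ h3
          refine Or.inr ⟨hok, (-1, 0), by simp [part_two_deltas], by show pvBall input m' (x - (-1), y - 0); simpa using hb⟩
        · obtain ⟨_, m', rfl, hb⟩ := hcand _ _ h3
          refine Or.inr ⟨hok, (0, -1), by simp [part_two_deltas], by show pvBall input m' (x - 0, y - (-1)); simpa using hb⟩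
        · obtain ⟨_, m', rfl, hb⟩ := hcand _ _ h3
          refine Or.inr ⟨hok, (0, 1), by simp [part_two_deltas], by show pvBall input m' (x - 0, y - 1); simpa using hb⟩

-- ---- counting ----
theorem pvFoldl_count_rows (c : List Int → Int) : ∀ (rows : List (List Int)) (acc : Int),
    rows.foldl (fun acc row => acc + c row) acc = acc + (rows.map c).sum := by
  intro rows
  induction rows with
  | nil => intro acc; simp
  | cons r rows ih =>
    intro acc
    rw [List.foldl_cons, ih, List.map_cons, List.sum_cons]
    ring

theorem pvCast_sum (l : List Int) (f : Int → Nat) :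
    (((l.map f).sum : Nat) : Int) = (l.map (fun a => ((f a : Nat) : Int))).sum := by
  induction l with
  | nil => simp
  | cons a l ih => simp [ih]

theorem pvT_mem (input : Int) (w : Int × Int) :
    w ∈ pvR.flatMap (fun x => (pvR.map (fun y => (x, y))).filter (fun w => decide (pvJ input 50 w.1 w.2 ≤ 50)))
      ↔ pvBall input 50 w := by
  simp only [List.mem_flatMap, List.mem_filter, List.mem_map, pvR, PySem.List.mem_pyRange_one]
  constructor
  · rintro ⟨x, hx, ⟨y, hy, rfl⟩, hq⟩
    simp only [decide_eq_true_eq] at hq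
    exact pvBall_of_J_le input 50 x y 50 (le_refl _) hx.1 hx.2 hy.1 hy.2 (by exact_mod_cast hq)
  · intro hb
    have hbd := pvBall_bounds input 50 w hb
    have hJ := pvJ_le_of_ball input 50 (le_refl _) w hb
    refine ⟨w.1, ⟨hbd.1, by omega⟩, ⟨w.2, ⟨hbd.2.1, by omega⟩, rfl⟩, by simpa using hJ⟩

set_option maxRecDepth 8192 in
theorem pvT_nodup (input : Int) :
    (pvR.flatMap (fun x => (pvR.map (fun y => (x, y))).filter (fun w => decide (pvJ input 50 w.1 w.2 ≤ 50)))).Nodup := by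
  rw [← List.filter_flatMap]
  have hprod : pvR.flatMap (fun x => pvR.map (fun y => (x, y))) = pvR ×ˢ pvR := rfl
  rw [hprod]
  exact (List.Nodup.product (PySem.List.nodup_pyRange_one 0 52) (PySem.List.nodup_pyRange_one 0 52)).filter _

set_option maxRecDepth 8192 in
set_option maxHeartbeats 1000000 in
theorem pvAlt_count (input : Int) :
    part_two_alt input
      = ((pvR.flatMap (fun x => (pvR.map (fun y => (x, y))).filter (fun w => decide (pvJ input 50 w.1 w.2 ≤ 50)))).length : Int) := by
  have h50 := pvAlt_dist input 50 0
  rw [show (0 + 50 : Nat) = 50 from rfl] at h50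
  have h0 : (PySem.List.pyRange 0 52 1).map (fun x => (PySem.List.pyRange 0 52 1).map (fun y => if x = 1 ∧ y = 1 then (0:Int) else 100))
      = pvGrid (pvJ input 0) := by
    rw [pvGrid]
    apply List.map_congr_left
    intro x _
    rw [pvRow]
    apply List.map_congr_left
    intro y _
    rfl
  have hB : part_two_alt input
      = (pvGrid (pvJ input 50)).foldl (fun acc row => row.foldl (fun acc d => if d ≤ 50 then acc + 1 else acc) acc) 0 := by
    simp only [part_two_alt]
    rw [h0, h50]
  rw [hB]
  have hfun : (fun (acc : Int) (row : List Int) => row.foldl (fun acc d => if d ≤ 50 then acc + 1 else acc) acc)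
      = (fun acc row => acc + (row.countP (fun d => decide (d ≤ 50)) : Int)) := by
    funext acc row
    exact PySem.List.foldl_ite_add_one (fun d => d ≤ 50) row acc
  rw [hfun, pvFoldl_count_rows, zero_add, List.length_flatMap]
  rw [pvCast_sum pvR (fun x => ((pvR.map (fun y => (x, y))).filter (fun w => decide (pvJ input 50 w.1 w.2 ≤ 50))).length)]
  rw [pvGrid, List.map_map]
  refine congrArg List.sum ?_
  apply List.map_congr_left
  intro x _
  simp only [Function.comp_apply]
  have h1 : (pvRow (pvJ input 50 x)).countP (fun d => decide (d ≤ 50))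
      = ((pvR.map (fun y => (x, y))).filter (fun w => decide (pvJ input 50 w.1 w.2 ≤ 50))).length := by
    rw [← List.countP_eq_length_filter, List.countP_map, pvRow, List.countP_map]
    rfl
  rw [h1]

set_option maxRecDepth 8192 in
theorem part_two_spec : Claim_equal_part_two := by
  intro input _
  unfold Spec_part_two part_two
  obtain ⟨hmem, hndA, _⟩ := pvMain input 50 [(1,1)] [(1,1)] (PySem.Set.empty : PySem.Set (Int × Int)) (PySem.Set.ofList [(1,1)]) (pvPar (1,1))
    (by intro c hc; simp at hc; subst hc; rfl)
    (by intro w; simp)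
    (by intro w; simp [PySem.Set.ofList, PySem.Set.empty, PySem.Set.add, PySem.Set.contains])
    (by simp [PySem.Set.empty])
    (PySem.Set.nodup_ofList _)
  have hloop : part_two_loop input (-1) [(1,1)] (PySem.Set.empty : PySem.Set (Int × Int)) = pvIterA input 51 [(1,1)] PySem.Set.empty :=
    pvLoopA_eq_iterA input 51 (-1) _ _ (by norm_num)
  have hlv : ∀ w, w ∈ (pvLevelLoop input 50 [(1,1)] (PySem.Set.ofList [(1,1)])).2 ↔ pvBall input 50 w := by
    have h := pvLevel_inv input 50 0 [(1,1)] (PySem.Set.ofList [(1,1)])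
      (by intro w
          show w ∈ PySem.Set.ofList [(1,1)] ↔ pvBall input 0 w
          simp [PySem.Set.ofList, PySem.Set.empty, PySem.Set.add, PySem.Set.contains, pvBall])
      (by intro w
          show w ∈ [((1:Int),(1:Int))] ↔ pvSphere input 0 w
          simp [pvSphere])
    simpa using h
  have hSeen : ∀ w, w ∈ (pvIterA input 51 [(1,1)] (PySem.Set.empty : PySem.Set (Int × Int))).2 ↔ pvBall input 50 w :=
    fun w => (hmem w).trans (hlv w)
  have hperm : (pvIterA input 51 [(1,1)] (PySem.Set.empty : PySem.Set (Int × Int))).2.Perm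
      (pvR.flatMap (fun x => (pvR.map (fun y => (x, y))).filter (fun w => decide (pvJ input 50 w.1 w.2 ≤ 50)))) :=
    (List.perm_ext_iff_of_nodup hndA (pvT_nodup input)).mpr
      (fun w => (hSeen w).trans (pvT_mem input w).symm)
  rw [hloop, pvAlt_count input]
  unfold PySem.Set.len
  rw [hperm.length_eq]
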